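-- pv_equiv track=rewrite | github.com/it21052392/Brainstation | Emotion-detection/main.py | classify_session
-- ===== SOURCE A (Python) =====
-- def classify_session(asrs_result, avg_erratic_percentage, avg_emotions):
--     if asrs_result == "Positive":
--         if avg_erratic_percentage > 50 and any(emotion in avg_emotions and avg_emotions[emotion] > 20 for emotion in ['Angry', 'Sad', 'Fearful', 'Disgusted']):
--             return "ADHD symptoms with emotional and head movement alterations"
--         elif any(emotion in avg_emotions and avg_emotions[emotion] > 20 for emotion in ['Angry', 'Sad', 'Fearful', 'Disgusted']):
--             return "ADHD symptoms with emotional alterations"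
--         elif avg_erratic_percentage > 50:
--             return "ADHD symptoms with head movement alterations"
--         else:
--             return "ADHD symptoms detected, consider monitoring"
--     else:
--         if avg_erratic_percentage > 50 and any(emotion in avg_emotions and avg_emotions[emotion] > 20 for emotion in ['Angry', 'Sad', 'Fearful', 'Disgusted']):
--             return "No ADHD symptoms with emotional and head movement alterations"
--         elif any(emotion in avg_emotions and avg_emotions[emotion] > 20 for emotion in ['Angry', 'Sad', 'Fearful', 'Disgusted']):
--             return "No ADHD symptoms with emotional alterations"
--         elif avg_erratic_percentage > 50:
--             return "No ADHD symptoms with head movement alterations"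
--         else:
--             return "No ADHD symptoms"
-- ===== SOURCE B (Python) =====
-- def classify_session(asrs_result, avg_erratic_percentage, avg_emotions):
--     alterations = []
--     if any(e in avg_emotions and avg_emotions[e] > 20
--            for e in ('Angry', 'Sad', 'Fearful', 'Disgusted')):
--         alterations.append("emotional")
--     if avg_erratic_percentage > 50:
--         alterations.append("head movement")
--     prefix = "ADHD symptoms" if asrs_result == "Positive" else "No ADHD symptoms"
--     if alterations:
--         return prefix + " with " + " and ".join(alterations) + " alterations"
--     if asrs_result == "Positive":
--         return prefix + " detected, consider monitoring"
--     return prefix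
-- ===== Notes on version B (the rewrite author's own statement) =====
-- stated objective: simpler
-- what changed: A selects one of eight hard-coded strings via two mirrored if/elif chains that re-run the emotion scan; B instead collects the triggered alteration names in a list and composes the output as prefix + ' with ' + ' and '.join(names) + ' alterations' (with the two no-alteration cases handled separately), so the eight literals disappear.
import Mathlib
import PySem

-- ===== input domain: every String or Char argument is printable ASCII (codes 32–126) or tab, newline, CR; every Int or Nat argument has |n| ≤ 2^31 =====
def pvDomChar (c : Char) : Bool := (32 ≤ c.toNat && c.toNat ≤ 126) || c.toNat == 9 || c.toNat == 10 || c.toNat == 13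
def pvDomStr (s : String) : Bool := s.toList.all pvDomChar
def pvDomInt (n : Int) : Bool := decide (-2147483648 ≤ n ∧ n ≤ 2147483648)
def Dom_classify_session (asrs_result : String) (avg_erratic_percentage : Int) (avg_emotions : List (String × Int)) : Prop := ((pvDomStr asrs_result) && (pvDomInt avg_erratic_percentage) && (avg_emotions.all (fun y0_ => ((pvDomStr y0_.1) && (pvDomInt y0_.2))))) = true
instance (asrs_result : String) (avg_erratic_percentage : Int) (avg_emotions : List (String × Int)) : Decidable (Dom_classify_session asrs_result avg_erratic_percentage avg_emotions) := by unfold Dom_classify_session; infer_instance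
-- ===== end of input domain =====

-- B builds the answer compositionally: it collects the triggered alteration names, joins them with " and ", and concatenates prefix + suffix, instead of A's two mirrored four-way if/elif chains of eight literal strings (simpler decomposition, same cost).


-- ===== PORT A =====
-- any(emotion in avg_emotions and avg_emotions[emotion] > 20 for ...) — the generator A repeats four times
def pvEmoAny (avg_emotions : List (String × Int)) : Bool :=
  (["Angry", "Sad", "Fearful", "Disgusted"] : List String).any (fun emotion =>
    match PySem.Dict.get? (PySem.Dict.mk avg_emotions) emotion with
    | some v => decide (20 < v)
    | none => false)

def classify_session (asrs_result : String) (avg_erratic_percentage : Int) (avg_emotions : List (String × Int)) : String :=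
  if asrs_result == "Positive" then
    if avg_erratic_percentage > 50 && pvEmoAny avg_emotions then
      "ADHD symptoms with emotional and head movement alterations"
    else if pvEmoAny avg_emotions then
      "ADHD symptoms with emotional alterations"
    else if avg_erratic_percentage > 50 then
      "ADHD symptoms with head movement alterations"
    else
      "ADHD symptoms detected, consider monitoring"
  else
    if avg_erratic_percentage > 50 && pvEmoAny avg_emotions then
      "No ADHD symptoms with emotional and head movement alterations"
    else if pvEmoAny avg_emotions then
      "No ADHD symptoms with emotional alterations"
    else if avg_erratic_percentage > 50 then
      "No ADHD symptoms with head movement alterations"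
    else
      "No ADHD symptoms"

-- ===== PORT B =====
-- " and ".join(parts) ported by hand, step for step (exact for any list of strings)
def pvJoin (sep : String) : List String → String
  | [] => ""
  | [x] => x
  | x :: xs => x ++ sep ++ pvJoin sep xs

-- B: collect triggered alteration names, join with " and ", compose prefix + suffix
def classify_session_alt (asrs_result : String) (avg_erratic_percentage : Int) (avg_emotions : List (String × Int)) : String :=
  let alterations : List String :=
    (if (["Angry", "Sad", "Fearful", "Disgusted"] : List String).any (fun e =>
          match PySem.Dict.get? (PySem.Dict.mk avg_emotions) e with
          | some v => decide (20 < v)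
          | none => false)
     then ["emotional"] else [])
    ++ (if avg_erratic_percentage > 50 then ["head movement"] else [])
  let pre := if asrs_result == "Positive" then "ADHD symptoms" else "No ADHD symptoms"
  if alterations ≠ [] then
    pre ++ " with " ++ pvJoin " and " alterations ++ " alterations"
  else if asrs_result == "Positive" then
    pre ++ " detected, consider monitoring"
  else
    pre

-- ===== PRECONDITION & SPEC =====
def Spec_classify_session (asrs_result : String) (avg_erratic_percentage : Int) (avg_emotions : List (String × Int)) (out : String) : Prop := out = classify_session_alt asrs_result avg_erratic_percentage avg_emotions
instance (asrs_result : String) (avg_erratic_percentage : Int) (avg_emotions : List (String × Int)) (out : String) : Decidable (Spec_classify_session asrs_result avg_erratic_percentage avg_emotions out) := by unfold Spec_classify_session; infer_instance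

-- ===== CLAIM (what is proved, stated in full; the proofs are below) =====
def Claim_equal_classify_session : Prop := ∀ (asrs_result : String) (avg_erratic_percentage : Int) (avg_emotions : List (String × Int)), Dom_classify_session asrs_result avg_erratic_percentage avg_emotions → Spec_classify_session asrs_result avg_erratic_percentage avg_emotions (classify_session asrs_result avg_erratic_percentage avg_emotions)

-- ===== LEMMAS AND PROOFS =====

-- ===== VERDICT (by name: the statement is the Claim_ definition above) =====
theorem classify_session_spec : Claim_equal_classify_session := by
  intro asrs_result avg_erratic_percentage avg_emotions _
  unfold Spec_classify_session classify_session classify_session_alt pvEmoAny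
  cases h1 : asrs_result == "Positive" <;>
    cases h2 : decide (avg_erratic_percentage > 50) <;>
      cases h3 : (["Angry", "Sad", "Fearful", "Disgusted"] : List String).any (fun e =>
          match PySem.Dict.get? (PySem.Dict.mk avg_emotions) e with
          | some v => decide (20 < v)
          | none => false) <;>
        simp_all [PySem.Dict.get?, pvJoin] <;>
          simp [if_neg (by omega : ¬ (50:Int) < avg_erratic_percentage), pvJoin]
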